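-- pv_equiv track=rewrite | github.com/AliHassan-creator/HEHE_BOY | Ai Project/test.py | steepest_hill_climbing
-- ===== SOURCE A (Python) =====
-- constraints = [
--     (0, 1), (1, 2), (2, 3), (2, 5), (2, 6),
--     (3, 5), (3, 4), (4, 5), (5, 6)
-- ]
--
-- def calculate_satisfied_constraints(state):
--     satisfied = 0
--     for region1, region2 in constraints:
--         if state[region1] != state[region2]:
--             satisfied += 1
--     return satisfied
--
-- def generate_neighbors(state):
--     neighbors = []
--     for region_index in range(len(state)):
--         current_color = state[region_index]
--
--         for new_color in [1, 2, 3]: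
--             if new_color != current_color:
--                 new_state = state[:]
--                 new_state[region_index] = new_color
--                 neighbors.append(new_state)
--     return neighbors
--
-- def steepest_hill_climbing(initial_state):
--     current_state = initial_state
--     current_score = calculate_satisfied_constraints(current_state)
--
--     while True:
--         neighbors = generate_neighbors(current_state)
--         best_neighbor = None
--         best_score = current_score
--
--         for neighbor in neighbors:
--             neighbor_score = calculate_satisfied_constraints(neighbor)
--             if neighbor_score > best_score:
--                 best_score = neighbor_score
--                 best_neighbor = neighbor
--
--         if best_neighbor is None or best_score <= current_score:
--             return current_state, current_score
--
--         current_state = best_neighbor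
--         current_score = best_score
-- ===== SOURCE B (Python) =====
-- def steepest_hill_climbing(initial_state):
--     cons = [(0, 1), (1, 2), (2, 3), (2, 5), (2, 6),
--             (3, 5), (3, 4), (4, 5), (5, 6)]
--     adj = {}
--     for u, v in cons:
--         adj.setdefault(u, []).append(v)
--         adj.setdefault(v, []).append(u)
--     state = list(initial_state)
--     score = sum(1 for u, v in cons if state[u] != state[v])
--     while True:
--         best_delta = 0
--         best_move = None
--         for i in range(len(state)):
--             partners = adj.get(i, [])
--             cur = state[i]
--             base = sum(1 for j in partners if cur != state[j])
--             for c in (1, 2, 3):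
--                 if c != cur:
--                     delta = sum(1 for j in partners if c != state[j]) - base
--                     if delta > best_delta:
--                         best_delta = delta
--                         best_move = (i, c)
--         if best_move is None:
--             return state, score
--         i, c = best_move
--         state[i] = c
--         score += best_delta
-- ===== Notes on version B (the rewrite author's own statement) =====
-- stated objective: faster
-- what changed: B precomputes an adjacency dict once and scores each candidate recoloring incrementally (current score minus incident constraints satisfied before plus those satisfied after) instead of A's materialising every neighbor state and rescanning all 9 constraints for each of them.
import Mathlib
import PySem

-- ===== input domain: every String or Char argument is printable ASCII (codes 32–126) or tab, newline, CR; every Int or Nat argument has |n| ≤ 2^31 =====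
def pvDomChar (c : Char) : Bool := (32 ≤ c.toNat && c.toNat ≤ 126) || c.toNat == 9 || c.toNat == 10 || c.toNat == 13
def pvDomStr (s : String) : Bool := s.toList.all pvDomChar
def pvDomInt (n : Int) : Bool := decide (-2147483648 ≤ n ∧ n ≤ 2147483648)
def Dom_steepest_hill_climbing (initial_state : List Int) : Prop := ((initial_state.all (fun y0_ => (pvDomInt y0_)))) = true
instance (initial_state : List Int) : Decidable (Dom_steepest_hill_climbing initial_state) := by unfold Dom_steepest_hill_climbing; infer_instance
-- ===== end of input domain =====

-- B re-scores each candidate recoloring incrementally from a precomputed adjacency dict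
-- (constant work per move) instead of A's full rescan of all 9 constraints per neighbor;
-- same hill-climbing trajectory and return value, no mutation of the argument.

-- ===== PORT A =====
-- region indices are nonnegative literals; `List.getD idx 0` is exact for Python's
-- `state[idx]` on every input admitted by Pre_ (length ≥ 7, so all accesses in range).
def pvConstraints : List (Nat × Nat) :=
  [(0,1), (1,2), (2,3), (2,5), (2,6), (3,5), (3,4), (4,5), (5,6)]

def calculate_satisfied_constraints (state : List Int) : Int :=
  pvConstraints.foldl
    (fun satisfied p =>
      if state.getD p.1 0 ≠ state.getD p.2 0 then satisfied + 1 else satisfied) 0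

def generate_neighbors (state : List Int) : List (List Int) :=
  (List.range state.length).foldl
    (fun neighbors region_index =>
      let current_color := state.getD region_index 0
      ([1, 2, 3] : List Int).foldl
        (fun neighbors new_color =>
          if new_color ≠ current_color then neighbors ++ [state.set region_index new_color]
          else neighbors) neighbors) []

-- the `while True` loop; fuel ≥ 11 only makes the recursion total: the score is an int in
-- [0, 9] and strictly increases on every continued iteration, so Python runs ≤ 10 rounds.
def pvLoopA : Nat → List Int → Int → List Int × Int
  | 0, current_state, current_score => (current_state, current_score)
  | fuel + 1, current_state, current_score =>
    let neighbors := generate_neighbors current_state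
    let best := neighbors.foldl
      (fun (b : Option (List Int) × Int) neighbor =>
        let neighbor_score := calculate_satisfied_constraints neighbor
        if neighbor_score > b.2 then (some neighbor, neighbor_score) else b)
      (none, current_score)
    match best.1 with
    | none => (current_state, current_score)
    | some best_neighbor =>
      if best.2 ≤ current_score then (current_state, current_score)
      else pvLoopA fuel best_neighbor best.2

def steepest_hill_climbing (initial_state : List Int) : List Int × Int :=
  pvLoopA 11 initial_state (calculate_satisfied_constraints initial_state)

-- ===== PORT B =====
def pvConsB : List (Nat × Nat) :=
  [(0,1), (1,2), (2,3), (2,5), (2,6), (3,5), (3,4), (4,5), (5,6)]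

-- adj = {}; for u, v in cons: adj.setdefault(u, []).append(v); adj.setdefault(v, []).append(u)
def pvAdj : PySem.Dict Nat (List Nat) :=
  pvConsB.foldl
    (fun adj p =>
      let adj := adj.insert p.1 (adj.getD p.1 [] ++ [p.2])
      adj.insert p.2 (adj.getD p.2 [] ++ [p.1]))
    PySem.Dict.empty

-- sum(1 for j in partners if c != state[j])
def pvCountNe (state : List Int) (c : Int) (partners : List Nat) : Int :=
  partners.foldl (fun acc j => if c ≠ state.getD j 0 then acc + 1 else acc) 0

-- score = sum(1 for u, v in cons if state[u] != state[v])
def pvScoreB (state : List Int) : Int :=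
  pvConsB.foldl
    (fun acc p => if state.getD p.1 0 ≠ state.getD p.2 0 then acc + 1 else acc) 0

def pvLoopB : Nat → List Int → Int → List Int × Int
  | 0, state, score => (state, score)
  | fuel + 1, state, score =>
    let best := (List.range state.length).foldl
      (fun (b : Int × Option (Nat × Int)) i =>
        let partners := pvAdj.getD i []
        let cur := state.getD i 0
        let base := pvCountNe state cur partners
        ([1, 2, 3] : List Int).foldl
          (fun b c =>
            if c ≠ cur then
              let delta := pvCountNe state c partners - base
              if delta > b.1 then (delta, some (i, c)) else b
            else b) b)
      (0, none)
    match best.2 with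
    | none => (state, score)
    | some (i, c) => pvLoopB fuel (state.set i c) (score + best.1)

def steepest_hill_climbing_alt (initial_state : List Int) : List Int × Int :=
  pvLoopB 11 initial_state (pvScoreB initial_state)

-- ===== PRECONDITION & SPEC =====
-- Python A raises IndexError when the state has fewer than 7 entries (the constraints
-- index regions 0..6); exactly those inputs are excluded.
def Pre_steepest_hill_climbing (initial_state : List Int) : Prop :=
  7 ≤ initial_state.length

instance (initial_state : List Int) : Decidable (Pre_steepest_hill_climbing initial_state) := by
  unfold Pre_steepest_hill_climbing; infer_instance

def pvWitness_steepest_hill_climbing : List Int := [1, 1, 2, 3, 1, 2, 3]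

def Spec_steepest_hill_climbing (initial_state : List Int) (out : List Int × Int) : Prop :=
  out = steepest_hill_climbing_alt initial_state

instance (initial_state : List Int) (out : List Int × Int) : Decidable (Spec_steepest_hill_climbing initial_state out) := by
  unfold Spec_steepest_hill_climbing; infer_instance

-- ===== CLAIM (what is proved, stated in full; the proofs are below) =====
def Claim_equal_steepest_hill_climbing : Prop := ∀ (initial_state : List Int), Dom_steepest_hill_climbing initial_state → Pre_steepest_hill_climbing initial_state → Spec_steepest_hill_climbing initial_state (steepest_hill_climbing initial_state)

-- ===== LEMMAS AND PROOFS =====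

-- generic score over a constraint list (calculate_satisfied_constraints = pvSatL · pvConstraints)
def pvSatL (s : List Int) (L : List (Nat × Nat)) : Int :=
  L.foldl (fun a p => if s.getD p.1 0 ≠ s.getD p.2 0 then a + 1 else a) 0

-- the partner list B reads from its dict, computed directly from the constraint list
def pvPartL (i : Nat) (L : List (Nat × Nat)) : List Nat :=
  L.foldl (fun l p =>
    let l := if p.1 = i then l ++ [p.2] else l
    if p.2 = i then l ++ [p.1] else l) []

lemma pvSatL_append (s : List Int) (L : List (Nat × Nat)) (p : Nat × Nat) :
    pvSatL s (L ++ [p]) = pvSatL s L + (if s.getD p.1 0 ≠ s.getD p.2 0 then 1 else 0) := by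
  unfold pvSatL
  rw [List.foldl_append]
  simp only [List.foldl_cons, List.foldl_nil]
  split_ifs <;> omega

lemma pvPartL_append (i : Nat) (L : List (Nat × Nat)) (p : Nat × Nat) :
    pvPartL i (L ++ [p]) =
      pvPartL i L ++ ((if p.1 = i then [p.2] else []) ++ (if p.2 = i then [p.1] else [])) := by
  unfold pvPartL
  rw [List.foldl_append]
  simp only [List.foldl_cons, List.foldl_nil]
  split_ifs <;> simp

lemma pvPartL_eq_nil {i : Nat} {L : List (Nat × Nat)}
    (h : ∀ p ∈ L, p.1 ≠ i ∧ p.2 ≠ i) : pvPartL i L = [] := by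
  induction L using List.reverseRecOn with
  | nil => rfl
  | append_singleton L p ih =>
    obtain ⟨h1, h2⟩ := h p (by simp)
    rw [pvPartL_append, ih (fun q hq => h q (by simp [hq])), if_neg h1, if_neg h2]
    simp

lemma pvAdj_getD (i : Nat) : pvAdj.getD i [] = pvPartL i pvConstraints := by
  match i with
  | 0 => decide
  | 1 => decide
  | 2 => decide
  | 3 => decide
  | 4 => decide
  | 5 => decide
  | 6 => decide
  | n + 7 =>
    have h1 : pvAdj.contains (n + 7) = false := by
      rw [PySem.Dict.contains_eq_decide_mem_keys]
      have hk : pvAdj.keys = [0, 1, 2, 3, 5, 6, 4] := by decide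
      rw [hk]
      simp only [List.mem_cons, List.not_mem_nil, or_false, decide_eq_false_iff_not]
      push Not
      refine ⟨?_, ?_, ?_, ?_, ?_, ?_, ?_⟩ <;> omega
    rw [PySem.Dict.getD_of_not_contains pvAdj [] h1]
    rw [pvPartL_eq_nil]
    intro p hp
    fin_cases hp <;> constructor <;> omega

lemma pvCountNe_append (s : List Int) (c : Int) (l1 l2 : List Nat) :
    pvCountNe s c (l1 ++ l2) = pvCountNe s c l1 + pvCountNe s c l2 := by
  unfold pvCountNe
  rw [PySem.List.foldl_ite_add_one, PySem.List.foldl_ite_add_one, PySem.List.foldl_ite_add_one,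
    List.countP_append]
  push_cast
  ring

lemma pv_getD_set (s : List Int) (i j : Nat) (c : Int) (hi : i < s.length) :
    (s.set i c).getD j 0 = if j = i then c else s.getD j 0 := by
  rw [List.getD_eq_getElem?_getD, List.getD_eq_getElem?_getD, List.getElem?_set]
  by_cases h : j = i
  · simp [h, hi]
  · simp [h, mt Eq.symm h]

lemma pv_delta_gen (s : List Int) (i : Nat) (c : Int) (hi : i < s.length)
    (L : List (Nat × Nat)) (hL : ∀ p ∈ L, p.1 ≠ p.2) :
    pvSatL (s.set i c) L
      = pvSatL s L + (pvCountNe s c (pvPartL i L) - pvCountNe s (s.getD i 0) (pvPartL i L)) := by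
  induction L using List.reverseRecOn with
  | nil => simp [pvSatL, pvPartL, pvCountNe]
  | append_singleton L p ih =>
    have hp : p.1 ≠ p.2 := hL p (by simp)
    have hL' : ∀ q ∈ L, q.1 ≠ q.2 := fun q hq => hL q (by simp [hq])
    rw [pvSatL_append, pvSatL_append, pvPartL_append, pvCountNe_append, pvCountNe_append,
      pvCountNe_append, pvCountNe_append, ih hL',
      pv_getD_set s i p.1 c hi, pv_getD_set s i p.2 c hi]
    by_cases h1 : p.1 = i <;> by_cases h2 : p.2 = i
    · exact absurd (h1.trans h2.symm) hp
    · simp only [h1, h2, if_true, if_false]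
      simp only [pvCountNe, List.foldl_cons, List.foldl_nil]
      split_ifs <;> omega
    · simp only [h1, h2, if_true, if_false]
      simp only [pvCountNe, List.foldl_cons, List.foldl_nil]
      split_ifs <;> omega
    · simp only [if_neg h1, if_neg h2]
      simp only [pvCountNe, List.foldl_nil]
      split_ifs <;> omega

-- main delta lemma: rescoring after a single recoloring = old score + incident delta
lemma pv_delta (s : List Int) (i : Nat) (c : Int) (hi : i < s.length) :
    calculate_satisfied_constraints (s.set i c)
      = calculate_satisfied_constraints s
        + (pvCountNe s c (pvAdj.getD i []) - pvCountNe s (s.getD i 0) (pvAdj.getD i [])) := by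
  rw [pvAdj_getD]
  exact pv_delta_gen s i c hi pvConstraints (by decide)

-- the invariant tying A's (best_neighbor, best_score) to B's (best_delta, best_move)
def pvRel (s : List Int) (sc : Int) (a : Option (List Int) × Int)
    (b : Int × Option (Nat × Int)) : Prop :=
  a.2 = sc + b.1 ∧
    ((a.1 = none ∧ b.2 = none ∧ b.1 = 0) ∨
     (∃ i c, b.2 = some (i, c) ∧ a.1 = some (s.set i c) ∧ 0 < b.1 ∧
        a.2 = calculate_satisfied_constraints (s.set i c)))

-- folding g over an appended-chunks accumulator is a nested fold
lemma pv_foldl_nested {α β : Type} (g : β → α → β) (chunk : Nat → List α) :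
    ∀ (l : List Nat) (acc : List α) (a : β),
      (l.foldl (fun ns i => ns ++ chunk i) acc).foldl g a
        = l.foldl (fun a i => (chunk i).foldl g a) (acc.foldl g a) := by
  intro l
  induction l with
  | nil => simp
  | cons i l ih =>
    intro acc a
    simp only [List.foldl_cons]
    rw [ih, List.foldl_append]

-- one candidate color step preserves the invariant
lemma pv_step1 (s : List Int) (sc : Int) (hsc : sc = calculate_satisfied_constraints s)
    (i : Nat) (hi : i < s.length) (c : Int)
    (a : Option (List Int) × Int) (b : Int × Option (Nat × Int)) (h : pvRel s sc a b) :
    pvRel s sc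
      (if c ≠ s.getD i 0 then
        (if calculate_satisfied_constraints (s.set i c) > a.2
         then (some (s.set i c), calculate_satisfied_constraints (s.set i c)) else a)
       else a)
      (if c ≠ s.getD i 0 then
        (if pvCountNe s c (pvAdj.getD i []) - pvCountNe s (s.getD i 0) (pvAdj.getD i []) > b.1
         then (pvCountNe s c (pvAdj.getD i []) - pvCountNe s (s.getD i 0) (pvAdj.getD i []),
               some (i, c))
         else b)
       else b) := by
  by_cases hc : c = s.getD i 0
  · simp only [hc, ne_eq, not_true_eq_false, if_false]
    exact h
  · simp only [ne_eq, hc, not_false_eq_true, if_true]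
    have hkey := pv_delta s i c hi
    obtain ⟨h1, h2⟩ := h
    have hb1 : 0 ≤ b.1 := by rcases h2 with ⟨_, _, h0⟩ | ⟨_, _, _, _, h0, _⟩ <;> omega
    by_cases hgt : calculate_satisfied_constraints (s.set i c) > a.2
    · have hd : pvCountNe s c (pvAdj.getD i []) - pvCountNe s (s.getD i 0) (pvAdj.getD i []) > b.1 := by
        omega
      rw [if_pos hgt, if_pos hd]
      refine ⟨?_, Or.inr ⟨i, c, rfl, rfl, ?_, rfl⟩⟩
      · show calculate_satisfied_constraints (s.set i c)
          = sc + (pvCountNe s c (pvAdj.getD i []) - pvCountNe s (s.getD i 0) (pvAdj.getD i []))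
        omega
      · show (0 : Int) < pvCountNe s c (pvAdj.getD i []) - pvCountNe s (s.getD i 0) (pvAdj.getD i [])
        omega
    · have hd : ¬ (pvCountNe s c (pvAdj.getD i []) - pvCountNe s (s.getD i 0) (pvAdj.getD i []) > b.1) := by
        omega
      rw [if_neg hgt, if_neg hd]
      exact ⟨h1, h2⟩

-- the inner color loop preserves the invariant
lemma pv_inner (s : List Int) (sc : Int) (hsc : sc = calculate_satisfied_constraints s)
    (i : Nat) (hi : i < s.length) :
    ∀ (cs : List Int) (a : Option (List Int) × Int) (b : Int × Option (Nat × Int)),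
      pvRel s sc a b →
      pvRel s sc
        (cs.foldl (fun a c =>
          if c ≠ s.getD i 0 then
            (if calculate_satisfied_constraints (s.set i c) > a.2
             then (some (s.set i c), calculate_satisfied_constraints (s.set i c)) else a)
          else a) a)
        (cs.foldl (fun b c =>
          if c ≠ s.getD i 0 then
            (if pvCountNe s c (pvAdj.getD i []) - pvCountNe s (s.getD i 0) (pvAdj.getD i []) > b.1
             then (pvCountNe s c (pvAdj.getD i []) - pvCountNe s (s.getD i 0) (pvAdj.getD i []),
                   some (i, c))
             else b)
          else b) b) := by
  intro cs
  induction cs with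
  | nil => intro a b h; exact h
  | cons c cs ih =>
    intro a b h
    exact ih _ _ (pv_step1 s sc hsc i hi c a b h)

-- the outer region loop preserves the invariant
lemma pv_outer (s : List Int) (sc : Int) (hsc : sc = calculate_satisfied_constraints s) :
    ∀ (l : List Nat), (∀ i ∈ l, i < s.length) →
    ∀ (a : Option (List Int) × Int) (b : Int × Option (Nat × Int)),
      pvRel s sc a b →
      pvRel s sc
        (l.foldl (fun a i => (([1, 2, 3] : List Int).foldl (fun a c =>
          if c ≠ s.getD i 0 then
            (if calculate_satisfied_constraints (s.set i c) > a.2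
             then (some (s.set i c), calculate_satisfied_constraints (s.set i c)) else a)
          else a) a)) a)
        (l.foldl (fun b i => (([1, 2, 3] : List Int).foldl (fun b c =>
          if c ≠ s.getD i 0 then
            (if pvCountNe s c (pvAdj.getD i []) - pvCountNe s (s.getD i 0) (pvAdj.getD i []) > b.1
             then (pvCountNe s c (pvAdj.getD i []) - pvCountNe s (s.getD i 0) (pvAdj.getD i []),
                   some (i, c))
             else b)
          else b) b)) b) := by
  intro l
  induction l with
  | nil => intro _ a b h; exact h
  | cons i l ih =>
    intro hl a b h
    exact ih (fun j hj => hl j (by simp [hj]))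
      _ _ (pv_inner s sc hsc i (hl i (by simp)) [1, 2, 3] a b h)

-- A's scan of the generated neighbor list is the nested region/color fold
lemma pv_bestA_shape (s : List Int) (init : Option (List Int) × Int) :
    (generate_neighbors s).foldl (fun a n =>
        if calculate_satisfied_constraints n > a.2
        then (some n, calculate_satisfied_constraints n) else a) init
      = (List.range s.length).foldl (fun a i => (([1, 2, 3] : List Int).foldl (fun a c =>
          if c ≠ s.getD i 0 then
            (if calculate_satisfied_constraints (s.set i c) > a.2
             then (some (s.set i c), calculate_satisfied_constraints (s.set i c)) else a)
          else a) a)) init := by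
  have hgen : generate_neighbors s
      = (List.range s.length).foldl (fun ns i =>
          ns ++ ((([1, 2, 3] : List Int).filter
            (fun c => decide (c ≠ s.getD i 0))).map (fun c => s.set i c))) [] := by
    unfold generate_neighbors
    apply PySem.List.foldl_congr_mem
    intro acc i _
    exact PySem.List.foldl_append_ite (fun c => c ≠ s.getD i 0) (fun c => s.set i c) _ acc
  rw [hgen, pv_foldl_nested]
  simp only [List.foldl_nil]
  apply PySem.List.foldl_congr_mem
  intro a i _
  rw [PySem.List.foldl_ite_eq_foldl_filter (fun c => c ≠ s.getD i 0)
    (fun a c => if calculate_satisfied_constraints (s.set i c) > a.2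
      then (some (s.set i c), calculate_satisfied_constraints (s.set i c)) else a)
    ([1, 2, 3] : List Int) a]
  rw [List.foldl_map]

lemma pv_loop_eq (f : Nat) : ∀ (s : List Int) (sc : Int),
    sc = calculate_satisfied_constraints s → pvLoopA f s sc = pvLoopB f s sc := by
  induction f with
  | zero => intro s sc _; rfl
  | succ f ih =>
    intro s sc hsc
    have hrel := pv_outer s sc hsc (List.range s.length)
      (fun i hi => List.mem_range.mp hi) (none, sc) (0, none)
      ⟨by simp, Or.inl ⟨rfl, rfl, rfl⟩⟩
    unfold pvLoopA pvLoopB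
    simp only [pv_bestA_shape s ((none, sc) : Option (List Int) × Int)]
    obtain ⟨h1, h2 | ⟨i, c, hb2, ha1, hpos, hcalc⟩⟩ := hrel
    · simp only [h2.1, h2.2.1]
    · simp only [ha1, hb2]
      split_ifs with hle
      · exact absurd hle (by omega)
      · rw [h1]
        exact ih _ _ (by omega)

-- ===== VERDICT (by name: the statement is the Claim_ definition above) =====
theorem steepest_hill_climbing_spec : Claim_equal_steepest_hill_climbing := by
  intro s _ _
  unfold Spec_steepest_hill_climbing steepest_hill_climbing steepest_hill_climbing_alt
  exact pv_loop_eq 11 s _ rfl
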